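-- pv_equiv track=rewrite | github.com/Thomas12141/KI_Praktikum | Aufgabe2/Aufgabe2-4.py | factorial_n_plus_one
-- ===== SOURCE A (Python) =====
-- def factorial_n_plus_one(n):
--     factorials = []
--     result = 1
--     for i in range(2, n + 2):
--         result *= i
--         factorials.append(result)
--     for j in range(len(factorials)):
--         yield "a" + str(len(factorials) - j) + " = " + str(factorials[len(factorials) - j - 1])
-- ===== SOURCE B (Python) =====
-- def factorial_n_plus_one(n):
--     total = 1
--     for i in range(2, n + 2):
--         total *= i
--     for k in range(n + 1, 1, -1):
--         yield "a" + str(k - 1) + " = " + str(total)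
--         total //= k
-- ===== Notes on version B (the rewrite author's own statement) =====
-- stated objective: alternative
-- what changed: Instead of storing all factorials in a list and reverse-indexing it, B computes (n+1)! once and yields the descending labels directly while peeling the single integer down by exact division total //= k.
import Mathlib
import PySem

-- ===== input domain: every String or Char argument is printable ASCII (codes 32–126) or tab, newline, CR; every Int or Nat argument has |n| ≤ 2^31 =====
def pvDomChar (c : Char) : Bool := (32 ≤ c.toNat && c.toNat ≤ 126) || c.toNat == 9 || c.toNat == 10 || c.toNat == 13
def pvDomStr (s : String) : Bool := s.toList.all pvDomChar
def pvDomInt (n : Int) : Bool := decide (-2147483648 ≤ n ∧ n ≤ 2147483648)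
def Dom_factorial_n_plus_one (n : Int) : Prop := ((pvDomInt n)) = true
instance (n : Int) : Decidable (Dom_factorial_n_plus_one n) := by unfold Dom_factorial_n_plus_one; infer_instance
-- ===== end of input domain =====

-- B builds (n+1)! once and yields the descending labels directly, dividing the
-- single running integer down instead of storing every factorial in a list and
-- reverse-indexing it (alternative decomposition, same O(n) cost).

-- ===== PORT A =====
def factorial_n_plus_one (n : Int) : List String :=
  -- factorials = []; result = 1; for i in range(2, n+2): result *= i; factorials.append(result)
  let st := (PySem.List.pyRange 2 (n + 2) 1).foldl
    (fun (p : Int × List Int) i => (p.1 * i, p.2 ++ [p.1 * i])) (1, [])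
  let factorials := st.2
  -- for j in range(len(factorials)): yield "a"+str(len-j)+" = "+str(factorials[len-j-1])
  (PySem.List.pyRange 0 (factorials.length : Int) 1).map (fun j =>
    "a" ++ PySem.Int.toStr ((factorials.length : Int) - j) ++ " = " ++
      PySem.Int.toStr (PySem.List.pyGetD factorials ((factorials.length : Int) - j - 1) 0))

-- ===== PORT B =====
def factorial_n_plus_one_alt (n : Int) : List String :=
  -- total = 1; for i in range(2, n+2): total *= i
  let total := (PySem.List.pyRange 2 (n + 2) 1).foldl (fun t i => t * i) 1
  -- for k in range(n+1, 1, -1): yield "a"+str(k-1)+" = "+str(total); total //= k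
  ((PySem.List.pyRange (n + 1) 1 (-1)).foldl
    (fun (p : Int × List String) k =>
      (PySem.Int.floordiv p.1 k,
       p.2 ++ ["a" ++ PySem.Int.toStr (k - 1) ++ " = " ++ PySem.Int.toStr p.1]))
    (total, [])).2

-- ===== PRECONDITION & SPEC =====
def Spec_factorial_n_plus_one (n : Int) (out : List String) : Prop := out = factorial_n_plus_one_alt n
instance (n : Int) (out : List String) : Decidable (Spec_factorial_n_plus_one n out) := by unfold Spec_factorial_n_plus_one; infer_instance

-- ===== CLAIM (what is proved, stated in full; the proofs are below) =====
def Claim_equal_factorial_n_plus_one : Prop := ∀ (n : Int), Dom_factorial_n_plus_one n → Spec_factorial_n_plus_one n (factorial_n_plus_one n)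

-- ===== LEMMAS AND PROOFS =====

def pvFact (k : Nat) : Int := (Nat.factorial k : Int)

-- the common descending output, head "a m = (m+1)!", tail down to "a1 = 2!"
def pvOut : Nat → List String
  | 0 => []
  | m + 1 => ("a" ++ PySem.Int.toStr ((m : Int) + 1) ++ " = " ++ PySem.Int.toStr (pvFact (m + 2))) :: pvOut m

lemma pvFact_succ (m : Nat) : pvFact (m + 1) = ((m : Int) + 1) * pvFact m := by
  unfold pvFact
  rw [Nat.factorial_succ]
  push_cast
  ring

lemma pvA_state (m : Nat) :
    (PySem.List.pyRange 2 ((m : Int) + 2) 1).foldl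
      (fun (p : Int × List Int) i => (p.1 * i, p.2 ++ [p.1 * i])) (1, []) =
      (pvFact (m + 1), (List.range m).map (fun i => pvFact (i + 2))) := by
  induction m with
  | zero => simp [PySem.List.pyRange_one_eq_nil, pvFact, Nat.factorial]
  | succ m ih =>
      have e : ((m + 1 : Nat) : Int) + 2 = ((m : Int) + 2) + 1 := by push_cast; ring
      rw [e, PySem.List.pyRange_one_succ_right (by omega), List.foldl_append, ih]
      simp only [List.foldl_cons, List.foldl_nil, List.range_succ, List.map_append, List.map_cons,
        List.map_nil]
      have hv : pvFact (m + 1) * ((m : Int) + 2) = pvFact (m + 2) := by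
        have h1 := pvFact_succ (m + 1)
        rw [show m + 1 + 1 = m + 2 from rfl] at h1
        rw [h1]; push_cast; ring
      rw [hv]


lemma pvB_state (m : Nat) (acc : List String) :
    (PySem.List.pyRange ((m : Int) + 1) 1 (-1)).foldl
      (fun (p : Int × List String) k =>
        (PySem.Int.floordiv p.1 k,
         p.2 ++ ["a" ++ PySem.Int.toStr (k - 1) ++ " = " ++ PySem.Int.toStr p.1]))
      (pvFact (m + 1), acc) = (1, acc ++ pvOut m) := by
  induction m generalizing acc with
  | zero => simp [PySem.List.pyRange_neg_one_eq_nil, pvOut, pvFact, Nat.factorial]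
  | succ m ih =>
      have e : ((m + 1 : Nat) : Int) + 1 = (m : Int) + 2 := by push_cast; ring
      have h : PySem.List.pyRange ((m : Int) + 2) 1 (-1) =
          ((m : Int) + 2) :: PySem.List.pyRange ((m : Int) + 1) 1 (-1) := by
        have := PySem.List.pyRange_neg_one_cons (a := (m : Int) + 2) (b := 1) (by omega)
        have e2 : (m : Int) + 2 - 1 = (m : Int) + 1 := by ring
        rw [e2] at this
        exact this
      have hdiv : PySem.Int.floordiv (pvFact (m + 2)) ((m : Int) + 2) = pvFact (m + 1) := by
        have h2 : pvFact (m + 2) = pvFact (m + 1) * ((m : Int) + 2) := by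
          have := pvFact_succ (m + 1); push_cast at this ⊢; linarith [this]
        rw [h2, PySem.Int.floordiv_eq_ediv_of_pos (by omega)]
        exact Int.mul_ediv_cancel _ (by omega)
      rw [e, h]
      simp only [List.foldl_cons]
      have hstep : pvFact (m + 1 + 1) = pvFact (m + 2) := rfl
      rw [hstep, hdiv, ih]
      have e3 : (m : Int) + 2 - 1 = (m : Int) + 1 := by ring
      rw [e3]
      simp [pvOut]

lemma pvOut_eq_map (m : Nat) :
    pvOut m = (List.range m).map (fun (j : Nat) =>
      "a" ++ PySem.Int.toStr ((m : Int) - (j : Int)) ++ " = " ++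
        PySem.Int.toStr (pvFact (m - j + 1 : Nat))) := by
  induction m with
  | zero => simp [pvOut]
  | succ m ih =>
      rw [List.range_succ_eq_map]
      simp only [List.map_cons, List.map_map]
      rw [pvOut, ih]
      refine congrArg₂ List.cons ?_ ?_
      · have e1 : ((m + 1 : Nat) : Int) - ((0 : Nat) : Int) = (m : Int) + 1 := by push_cast; ring
        have e2 : m + 1 - 0 + 1 = m + 2 := by omega
        rw [e1, e2]
      · apply List.map_congr_left
        intro j hj
        simp only [Function.comp]
        have e1 : ((m + 1 : Nat) : Int) - ((j + 1 : Nat) : Int) = (m : Int) - (j : Int) := by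
          push_cast; ring
        have e2 : m + 1 - (j + 1) + 1 = m - j + 1 := by omega
        rw [e1, e2]

theorem factorial_n_plus_one_spec : Claim_equal_factorial_n_plus_one := by
  unfold Claim_equal_factorial_n_plus_one Spec_factorial_n_plus_one
  intro n _
  unfold factorial_n_plus_one factorial_n_plus_one_alt
  dsimp only
  by_cases hn : n ≤ 0
  · rw [PySem.List.pyRange_one_eq_nil (by omega), PySem.List.pyRange_neg_one_eq_nil (by omega)]
    simp
  · replace hn : 0 < n := by omega
    obtain ⟨m, rfl⟩ : ∃ m : Nat, n = (m : Int) := ⟨n.toNat, (Int.toNat_of_nonneg (by omega)).symm⟩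
    have hA := pvA_state m
    have hmul : (PySem.List.pyRange 2 ((m : Int) + 2) 1).foldl (fun t i => t * i) 1 = pvFact (m + 1) := by
      have : ∀ l : List Int, ∀ p : Int × List Int,
          ((l.foldl (fun (p : Int × List Int) i => (p.1 * i, p.2 ++ [p.1 * i])) p).1)
            = l.foldl (fun t i => t * i) p.1 := by
        intro l; induction l with
        | nil => intro p; rfl
        | cons x t ihl => intro p; simp [List.foldl_cons, ihl]
      have h1 := this (PySem.List.pyRange 2 ((m : Int) + 2) 1) (1, [])
      rw [hA] at h1
      exact h1.symm
    rw [hA, hmul]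
    have hB := pvB_state m []
    simp only [List.nil_append] at hB
    rw [hB]
    simp only [List.length_map, List.length_range]
    rw [PySem.List.pyRange_zero_natCast, List.map_map]
    rw [pvOut_eq_map]
    apply List.map_congr_left
    intro j hj
    simp only [Function.comp]
    have hj' : j < m := List.mem_range.mp hj
    have hidx : ((m : Int) - (j : Int) - 1) = ((m - j - 1 : Nat) : Int) := by omega
    rw [hidx, PySem.List.pyGetD_natCast]
    have hlt : m - j - 1 < m := by omega
    simp only [List.getD_eq_getElem?_getD, List.getElem?_map, List.getElem?_range, hlt]
    simp only [Option.map_some, Option.getD_some]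
    have e : m - j - 1 + 2 = m - j + 1 := by omega
    rw [e]

-- ===== VERDICT (by name: the statement is the Claim_ definition above) =====
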